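-- pv_equiv track=rewrite | github.com/Parkyes90/algo | leetcode/2301~2400/2389. Longest Subsequence With Limited Sum.py | answerQueries
-- ===== SOURCE A (Python) =====
-- from typing import List
--
-- def answerQueries(nums: List[int], queries: List[int]) -> List[int]:
--     nums.sort()
--     answer = []
--     counter = {}
--     _sum = 0
--     for i, num in enumerate(nums):
--         _sum += num
--         counter[i] = _sum
--
--     for query in queries:
--         length = 0
--         while length < len(nums) and counter[length] <= query:
--             length += 1
--         answer.append(length)
--     return answer
-- ===== SOURCE B (Python) =====
-- from typing import List
--
-- def answerQueries(nums: List[int], queries: List[int]) -> List[int]: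
--     nums.sort()
--     prefix = []
--     s = 0
--     for num in nums:
--         s += num
--         prefix.append(s)
--     order = sorted(range(len(queries)), key=lambda i: queries[i])
--     ans = [0] * len(queries)
--     length = 0
--     for i in order:
--         q = queries[i]
--         while length < len(prefix) and prefix[length] <= q:
--             length += 1
--         ans[i] = length
--     return ans
-- ===== Notes on version B (the rewrite author's own statement) =====
-- stated objective: faster
-- what changed: B replaces A's per-query linear scan of the prefix sums (restarting from index 0 for every query) by an offline sweep: it sorts the query indices by query value and advances a single pointer over the prefix-sum list, so the pointer moves at most n steps in total.
import Mathlib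
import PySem

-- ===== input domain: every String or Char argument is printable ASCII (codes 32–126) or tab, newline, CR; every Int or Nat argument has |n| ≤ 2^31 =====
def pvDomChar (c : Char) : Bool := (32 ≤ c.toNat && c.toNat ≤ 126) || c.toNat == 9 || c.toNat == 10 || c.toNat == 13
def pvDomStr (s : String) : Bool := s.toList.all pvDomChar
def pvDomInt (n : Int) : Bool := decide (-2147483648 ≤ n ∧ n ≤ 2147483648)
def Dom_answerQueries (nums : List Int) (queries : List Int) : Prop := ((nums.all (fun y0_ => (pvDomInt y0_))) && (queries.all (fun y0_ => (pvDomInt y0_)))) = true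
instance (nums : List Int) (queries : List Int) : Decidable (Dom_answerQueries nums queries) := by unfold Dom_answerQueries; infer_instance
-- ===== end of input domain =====

-- B replaces A's per-query scan from index 0 by an offline sweep: queries are processed in
-- sorted order and one pointer over the prefix sums only ever advances.  Both A and B sort
-- the argument `nums` in place in Python; the equivalence proved is about the return value.

-- ===== PORT A =====
-- while length < len(nums) and counter[length] <= query: length += 1   (fuel = len(nums) - length)
def pvALoop (counter : PySem.Dict Int Int) (query : Int) : Nat → Int → Int
  | 0, length => length
  | fuel + 1, length =>
      if counter.getD length 0 ≤ query then pvALoop counter query fuel (length + 1) else length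

def answerQueries (nums : List Int) (queries : List Int) : List Int :=
  let sortedNums := PySem.List.sorted nums (fun x => x) false
  let st := (PySem.List.enumerate sortedNums 0).foldl
      (fun (st : Int × PySem.Dict Int Int) p => (st.1 + p.2, st.2.insert p.1 (st.1 + p.2)))
      (0, PySem.Dict.empty)
  queries.foldl (fun answer query => answer ++ [pvALoop st.2 query sortedNums.length 0]) []

-- ===== PORT B =====
-- while length < len(prefix) and prefix[length] <= q: length += 1   (fuel = len(prefix) - length)
def pvBLoop (pfx : List Int) (q : Int) : Nat → Int → Int
  | 0, length => length
  | fuel + 1, length =>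
      if PySem.List.pyGetD pfx length 0 ≤ q then pvBLoop pfx q fuel (length + 1) else length

def answerQueries_alt (nums : List Int) (queries : List Int) : List Int :=
  let sortedNums := PySem.List.sorted nums (fun x => x) false
  let prefixL := (sortedNums.foldl
      (fun (st : Int × List Int) num => (st.1 + num, st.2 ++ [st.1 + num])) (0, ([] : List Int))).2
  let order := PySem.List.sorted (PySem.List.pyRange 0 (queries.length : Int) 1)
      (fun i => PySem.List.pyGetD queries i 0) false
  let final := order.foldl (fun (st : Int × List Int) i =>
      let q := PySem.List.pyGetD queries i 0
      let length := pvBLoop prefixL q (prefixL.length - st.1.toNat) st.1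
      (length, st.2.set i.toNat length)) (0, List.replicate queries.length 0)
  final.2

-- ===== PRECONDITION & SPEC =====
def Spec_answerQueries (nums : List Int) (queries : List Int) (out : List Int) : Prop := out = answerQueries_alt nums queries
instance (nums : List Int) (queries : List Int) (out : List Int) : Decidable (Spec_answerQueries nums queries out) := by unfold Spec_answerQueries; infer_instance

-- ===== CLAIM (what is proved, stated in full; the proofs are below) =====
def Claim_equal_answerQueries : Prop := ∀ (nums : List Int) (queries : List Int), Dom_answerQueries nums queries → Spec_answerQueries nums queries (answerQueries nums queries)

-- ===== LEMMAS AND PROOFS =====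

/-- the list of prefix sums of `xs` starting from running total `s` -/
def pvPfx (s : Int) : List Int → List Int
  | [] => []
  | x :: t => (s + x) :: pvPfx (s + x) t

/-- the value both programs answer per query: how many leading prefix sums are ≤ q
(the scan stops at the FIRST prefix sum exceeding q). -/
def pvF (P : List Int) (q : Int) : Int := ((P.takeWhile (fun x => decide (x ≤ q))).length : Int)

theorem pvPfx_length (xs : List Int) (s : Int) : (pvPfx s xs).length = xs.length := by
  induction xs generalizing s with
  | nil => rfl
  | cons x t ih => simp [pvPfx, ih]

theorem pv_bfold (xs : List Int) (s : Int) (acc : List Int) :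
    xs.foldl (fun (st : Int × List Int) num => (st.1 + num, st.2 ++ [st.1 + num])) (s, acc)
      = (s + xs.sum, acc ++ pvPfx s xs) := by
  induction xs generalizing s acc with
  | nil => simp [pvPfx]
  | cons x t ih =>
      rw [List.foldl_cons, ih (s + x) (acc ++ [s + x])]
      simp [pvPfx]
      ring

theorem pv_adict (xs : List Int) (k s : Int) (d : PySem.Dict Int Int) (j : Int) :
    (((PySem.List.enumerate xs k).foldl
        (fun (st : Int × PySem.Dict Int Int) p => (st.1 + p.2, st.2.insert p.1 (st.1 + p.2)))
        (s, d)).2).getD j 0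
      = if k ≤ j ∧ j < k + xs.length then (pvPfx s xs).getD (j - k).toNat 0 else d.getD j 0 := by
  induction xs generalizing k s d with
  | nil => simp
  | cons x t ih =>
      rw [PySem.List.enumerate_cons, List.foldl_cons,
          ih (k + 1) (s + x) (d.insert k (s + x)), PySem.Dict.getD_insert]
      simp only [List.length_cons]
      push_cast
      by_cases hjk : j = k
      · subst hjk
        rw [if_neg (by omega), if_pos rfl, if_pos (by omega)]
        have h0 : (j - j).toNat = 0 := by omega
        rw [h0]
        simp [pvPfx]
      · rw [if_neg hjk]
        by_cases hin : k + 1 ≤ j ∧ j < k + 1 + (t.length : Int)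
        · rw [if_pos hin, if_pos (by omega)]
          have h2 : (j - k).toNat = (j - (k + 1)).toNat + 1 := by omega
          rw [h2]
          simp [pvPfx]
        · rw [if_neg hin, if_neg (by omega)]

theorem pv_bscan (P : List Int) (q : Int) :
    ∀ (f s : Nat), s + f = P.length →
      pvBLoop P q f (s : Int)
        = (s : Int) + (((P.drop s).takeWhile (fun x => decide (x ≤ q))).length : Int) := by
  intro f
  induction f with
  | zero =>
      intro s hs
      have : P.drop s = [] := List.drop_of_length_le (by omega)
      simp [pvBLoop, this]
  | succ f ih =>
      intro s hs
      have hslt : s < P.length := by omega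
      have hget : PySem.List.pyGetD P (s : Int) 0 = P[s] := by
        rw [PySem.List.pyGetD_natCast]
        exact List.getD_eq_getElem P 0 hslt
      have hdrop : P.drop s = P[s] :: P.drop (s + 1) := List.drop_eq_getElem_cons hslt
      rw [pvBLoop, hget, hdrop]
      by_cases hle : P[s] ≤ q
      · rw [if_pos hle]
        have hc : ((s : Int) + 1) = ((s + 1 : Nat) : Int) := by push_cast; ring
        rw [hc, ih (s + 1) (by omega),
            List.takeWhile_cons, if_pos (by simpa using hle), List.length_cons]
        push_cast
        ring
      · rw [if_neg hle, List.takeWhile_cons, if_neg (by simpa using hle)]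
        simp

theorem pv_loop_eq (counter : PySem.Dict Int Int) (P : List Int) (q : Int)
    (hag : ∀ j : Nat, j < P.length → counter.getD (j : Int) 0 = P.getD j 0) :
    ∀ (f s : Nat), s + f ≤ P.length →
      pvALoop counter q f (s : Int) = pvBLoop P q f (s : Int) := by
  intro f
  induction f with
  | zero => intro s _; rfl
  | succ f ih =>
      intro s hs
      rw [pvALoop, pvBLoop, hag s (by omega), PySem.List.pyGetD_natCast]
      by_cases hle : P.getD s 0 ≤ q
      · rw [if_pos hle, if_pos hle]
        have : ((s : Int) + 1) = ((s + 1 : Nat) : Int) := by push_cast; ring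
        rw [this, ih (s + 1) (by omega)]
      · rw [if_neg hle, if_neg hle]

theorem pv_takeWhile_split (q : Int) :
    ∀ (j : Nat) (P : List Int), j ≤ P.length → (∀ x ∈ P.take j, x ≤ q) →
      (P.takeWhile (fun x => decide (x ≤ q))).length
        = j + ((P.drop j).takeWhile (fun x => decide (x ≤ q))).length := by
  intro j
  induction j with
  | zero => intro P _ _; simp
  | succ j ih =>
      intro P hlen hall
      match P with
      | [] => simp at hlen
      | x :: t =>
          have hx : x ≤ q := hall x (by simp)
          have ht : ∀ y ∈ t.take j, y ≤ q := fun y hy => hall y (by simp [hy])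
          simp only [List.takeWhile_cons, decide_eq_true_eq, if_pos hx, List.drop_succ_cons]
          simp [ih t (by simpa using hlen) ht]
          omega

/-- the combined scan: starting at a safe position `len`, the fueled while loop lands on `pvF`. -/
theorem pv_bscan_full (P : List Int) (q : Int) (len : Int)
    (h0 : 0 ≤ len) (hn : len.toNat ≤ P.length)
    (hsafe : ∀ x ∈ P.take len.toNat, x ≤ q) :
    pvBLoop P q (P.length - len.toNat) len = pvF P q := by
  obtain ⟨s, rfl⟩ : ∃ s : Nat, len = (s : Int) := ⟨len.toNat, by omega⟩
  simp only [Int.toNat_natCast] at hn hsafe ⊢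
  rw [pv_bscan P q (P.length - s) s (by omega), pvF,
      pv_takeWhile_split q s P hn hsafe]
  push_cast
  ring

theorem pv_take_pvF (P : List Int) (q : Int) :
    P.take (pvF P q).toNat = P.takeWhile (fun x => decide (x ≤ q)) := by
  have hpre : P.takeWhile (fun x => decide (x ≤ q)) <+: P := List.takeWhile_prefix _
  have := (List.prefix_iff_eq_take.mp hpre)
  rw [pvF]
  simpa using this.symm

theorem pv_main_fold (queries P : List Int) :
    ∀ (os : List Int) (len : Int) (ans : List Int),
      os.Pairwise (fun a b => PySem.List.pyGetD queries a 0 ≤ PySem.List.pyGetD queries b 0) →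
      (∀ i ∈ os, 0 ≤ i ∧ i < (queries.length : Int)) →
      0 ≤ len → len.toNat ≤ P.length →
      (∀ x ∈ P.take len.toNat, ∀ i ∈ os, x ≤ PySem.List.pyGetD queries i 0) →
      ans.length = queries.length →
      (os.foldl (fun (st : Int × List Int) i =>
          (pvBLoop P (PySem.List.pyGetD queries i 0) (P.length - st.1.toNat) st.1,
           st.2.set i.toNat (pvBLoop P (PySem.List.pyGetD queries i 0) (P.length - st.1.toNat) st.1)))
        (len, ans)).2.length = ans.length ∧
      ∀ k : Nat, ((os.foldl (fun (st : Int × List Int) i =>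
          (pvBLoop P (PySem.List.pyGetD queries i 0) (P.length - st.1.toNat) st.1,
           st.2.set i.toNat (pvBLoop P (PySem.List.pyGetD queries i 0) (P.length - st.1.toNat) st.1)))
        (len, ans)).2)[k]?
          = if ((k : Int) ∈ os) then some (pvF P (queries.getD k 0)) else ans[k]? := by
  intro os
  induction os with
  | nil => intro len ans _ _ _ _ _ _; simp
  | cons i os ih =>
      intro len ans hpair hmem h0 hn hsafe hansl
      have hi := hmem i (by simp)
      set q := PySem.List.pyGetD queries i 0 with hq
      have hscan : pvBLoop P q (P.length - len.toNat) len = pvF P q :=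
        pv_bscan_full P q len h0 hn (fun x hx => hsafe x hx i (by simp))
      have hqd : queries.getD i.toNat 0 = q := by
        rw [hq, show i = ((i.toNat : Nat) : Int) from by omega,
            PySem.List.pyGetD_natCast, Int.toNat_natCast]
      have hFle : (pvF P q).toNat ≤ P.length := by
        rw [pvF]
        simpa using (List.takeWhile_prefix (fun x => decide (x ≤ q))).length_le
      have hF0 : 0 ≤ pvF P q := by rw [pvF]; positivity
      have hsafe' : ∀ x ∈ P.take (pvF P q).toNat, ∀ jj ∈ os, x ≤ PySem.List.pyGetD queries jj 0 := by
        intro x hx jj hjj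
        rw [pv_take_pvF] at hx
        have hxq : x ≤ q := by simpa using List.mem_takeWhile_imp hx
        have : q ≤ PySem.List.pyGetD queries jj 0 := (List.pairwise_cons.mp hpair).1 jj hjj
        omega
      have ihr := ih (pvF P q) (ans.set i.toNat (pvF P q))
        (List.pairwise_cons.mp hpair).2
        (fun j hj => hmem j (by simp [hj]))
        hF0 hFle hsafe' (by simpa using hansl)
      rw [List.foldl_cons]
      simp only [← hq, hscan]
      refine ⟨by simpa using ihr.1, ?_⟩
      intro k
      rw [ihr.2 k]
      by_cases hkos : (k : Int) ∈ os
      · simp [hkos]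
      · by_cases hki : k = i.toNat
        · subst hki
          have hklt : i.toNat < ans.length := by omega
          have hmemc : ((i.toNat : Int) ∈ i :: os) := by
            have : (i.toNat : Int) = i := by omega
            simp [this]
          rw [if_neg hkos, if_pos hmemc, List.getElem?_set_self (by omega), hqd]
        · have hki' : (k : Int) ≠ i := by omega
          rw [if_neg hkos, if_neg (by simp [hki', hkos]), List.getElem?_set_ne (by omega)]

theorem pv_alt_eq_map (nums queries : List Int) :
    answerQueries_alt nums queries
      = queries.map (fun q => pvF (pvPfx 0 (PySem.List.sorted nums (fun x => x) false)) q) := by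
  rw [answerQueries_alt]
  set sortedNums := PySem.List.sorted nums (fun x => x) false with hsn
  set P := pvPfx 0 sortedNums with hP
  have hpre : (sortedNums.foldl
      (fun (st : Int × List Int) num => (st.1 + num, st.2 ++ [st.1 + num])) (0, ([] : List Int))).2 = P := by
    rw [pv_bfold]; simp [hP]
  rw [hpre]
  set order := PySem.List.sorted (PySem.List.pyRange 0 (queries.length : Int) 1)
      (fun i => PySem.List.pyGetD queries i 0) false with horder
  have hmem : ∀ i ∈ order, 0 ≤ i ∧ i < (queries.length : Int) := by
    intro i hi
    rw [horder, PySem.List.mem_sorted, PySem.List.mem_pyRange_one] at hi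
    exact hi
  have hpair := PySem.List.sorted_pairwise (PySem.List.pyRange 0 (queries.length : Int) 1)
      (fun i => PySem.List.pyGetD queries i 0)
  have hmain := pv_main_fold queries P order 0 (List.replicate queries.length 0)
      hpair hmem le_rfl (by simp) (by simp) (by simp)
  refine List.ext_getElem? ?_
  intro k
  rw [hmain.2 k]
  by_cases hk : k < queries.length
  · have hkin : (k : Int) ∈ order := by
      rw [horder, PySem.List.mem_sorted, PySem.List.mem_pyRange_one]
      constructor <;> omega
    rw [if_pos hkin, List.getElem?_map, List.getElem?_eq_getElem hk]
    simp [List.getD_eq_getElem?_getD, List.getElem?_eq_getElem hk]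
  · have hkout : ¬ ((k : Int) ∈ order) := by
      intro hc
      have := hmem _ hc
      omega
    rw [if_neg hkout, List.getElem?_eq_none_iff.mpr (by simpa using hk),
        List.getElem?_eq_none_iff.mpr (by simp; omega)]

theorem pv_a_eq_map (nums queries : List Int) :
    answerQueries nums queries
      = queries.map (fun q => pvF (pvPfx 0 (PySem.List.sorted nums (fun x => x) false)) q) := by
  rw [answerQueries]
  set sortedNums := PySem.List.sorted nums (fun x => x) false with hsn
  set P := pvPfx 0 sortedNums with hP
  set counter := ((PySem.List.enumerate sortedNums 0).foldl
      (fun (st : Int × PySem.Dict Int Int) p => (st.1 + p.2, st.2.insert p.1 (st.1 + p.2)))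
      (0, PySem.Dict.empty)).2 with hc
  have hag : ∀ j : Nat, j < P.length → counter.getD (j : Int) 0 = P.getD j 0 := by
    intro j hj
    rw [hP, pvPfx_length] at hj
    rw [hc, pv_adict]
    rw [if_pos (by refine ⟨by positivity, ?_⟩; omega)]
    simp [hP]
  have hlen : sortedNums.length = P.length := by rw [hP, pvPfx_length]
  rw [PySem.List.foldl_append_singleton_eq_map]
  refine List.map_congr_left ?_
  intro q _
  have h0 : ((0 : Nat) : Int) = (0 : Int) := by norm_num
  calc pvALoop counter q sortedNums.length 0
      = pvBLoop P q sortedNums.length 0 := by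
        rw [← h0, pv_loop_eq counter P q hag sortedNums.length 0 (by omega)]
    _ = pvF P q := by
        have := pv_bscan P q P.length 0 (by omega)
        rw [hlen, ← h0, this]
        simp [pvF]

-- ===== VERDICT (by name: the statement is the Claim_ definition above) =====
theorem answerQueries_spec : Claim_equal_answerQueries := by
  intro nums queries _
  unfold Spec_answerQueries
  rw [pv_a_eq_map, pv_alt_eq_map]
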